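-- pv_equiv track=rewrite | github.com/CodecoolGlobal/erp-mvc-jupiter | model/hr/hr.py | get_shortest_surname
-- ===== SOURCE A (Python) =====
-- NAME = 1
--
-- def get_shortest_surname(table):
--     """
--     Question: Who's got the shortest surname
--
--     Args:
--         table: Data table to work on
--
--     Returns:
--         list: List of strings with names
--
--     """
--
--     # get list of surnames
--     names_list = []
--     splited_name = []
--     for row in table:
--         splited_name = row[NAME].split(' ')
--         names_list.append(splited_name[1])
--
--     # get shortest name's lenght
--     shortest_name_lenght = len(names_list[0])
--     for i in range(len(names_list)):
--         if len(names_list[i]) < shortest_name_lenght: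
--             shortest_name_lenght = len(names_list[i])
--
--     # create list of shortest surnames
--     shortest_surnames = []
--     for i in range(len(names_list)):
--         if len(names_list[i]) == shortest_name_lenght:
--             shortest_surnames.append(names_list[i])
--
--     return shortest_surnames[0]
-- ===== SOURCE B (Python) =====
-- NAME = 1
--
-- def get_shortest_surname(table):
--     surnames = [row[NAME].split(' ')[1] for row in table]
--     return sorted(surnames, key=len)[0]
-- ===== Notes on version B (the rewrite author's own statement) =====
-- stated objective: idiomatic
-- what changed: B replaces A's three explicit loops (collect surnames, scan for the minimal length, filter and pick the first) by a comprehension plus one stable sort by length, returning the first element of the sorted list.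
import Mathlib
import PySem

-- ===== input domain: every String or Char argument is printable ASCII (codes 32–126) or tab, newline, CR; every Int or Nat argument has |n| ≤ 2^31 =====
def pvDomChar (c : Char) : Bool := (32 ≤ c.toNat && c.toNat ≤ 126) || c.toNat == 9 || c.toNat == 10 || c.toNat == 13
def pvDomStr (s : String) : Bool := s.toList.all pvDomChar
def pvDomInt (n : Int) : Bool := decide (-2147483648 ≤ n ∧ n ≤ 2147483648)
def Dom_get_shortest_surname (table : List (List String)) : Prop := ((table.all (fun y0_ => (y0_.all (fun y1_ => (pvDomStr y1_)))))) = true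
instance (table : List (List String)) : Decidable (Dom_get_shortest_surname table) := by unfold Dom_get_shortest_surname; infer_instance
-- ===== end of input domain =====

-- B replaces A's three loops (collect, min-length scan, filter and take first) by one stable sort by
-- length and taking the first element; objective: more idiomatic, same result (stable sort keeps the
-- first surname of minimal length first).

-- ===== PORT A =====
def get_shortest_surname (table : List (List String)) : String :=
  let names_list : List String :=
    table.foldl (fun acc row =>
      acc ++ [PySem.List.pyGetD ((PySem.Str.split? (PySem.List.pyGetD row 1 "") " ").getD []) 1 ""]) []
  let shortest_name_lenght : Int :=
    (PySem.List.pyRange 0 (names_list.length : Int) 1).foldl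
      (fun s i => if PySem.Str.len (PySem.List.pyGetD names_list i "") < s
                  then PySem.Str.len (PySem.List.pyGetD names_list i "") else s)
      (PySem.Str.len (PySem.List.pyGetD names_list 0 ""))
  let shortest_surnames : List String :=
    (PySem.List.pyRange 0 (names_list.length : Int) 1).foldl
      (fun acc i => if PySem.Str.len (PySem.List.pyGetD names_list i "") == shortest_name_lenght
                    then acc ++ [PySem.List.pyGetD names_list i ""] else acc) []
  PySem.List.pyGetD shortest_surnames 0 ""

-- ===== PORT B =====
def get_shortest_surname_alt (table : List (List String)) : String :=
  let surnames : List String :=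
    table.map (fun row =>
      PySem.List.pyGetD ((PySem.Str.split? (PySem.List.pyGetD row 1 "") " ").getD []) 1 "")
  PySem.List.pyGetD (PySem.List.sorted surnames (fun s => PySem.Str.len s)) 0 ""

-- ===== PRECONDITION & SPEC =====
-- Pre_ excludes exactly the inputs on which the Python A raises IndexError: the empty table, a row
-- with fewer than two columns, and a name cell whose split on ' ' yields fewer than two parts.
def Pre_get_shortest_surname (table : List (List String)) : Prop :=
  table ≠ [] ∧ ∀ row ∈ table, 2 ≤ row.length ∧
    2 ≤ ((PySem.Str.split? (row.getD 1 "") " ").getD []).length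
instance (table : List (List String)) : Decidable (Pre_get_shortest_surname table) := by
  unfold Pre_get_shortest_surname; infer_instance

def pvWitness_get_shortest_surname : List (List String) := [["1", "Ann Poe"], ["2", "Bo Li"]]

def Spec_get_shortest_surname (table : List (List String)) (out : String) : Prop :=
  out = get_shortest_surname_alt table
instance (table : List (List String)) (out : String) : Decidable (Spec_get_shortest_surname table out) := by
  unfold Spec_get_shortest_surname; infer_instance

-- ===== CLAIM (what is proved, stated in full; the proofs are below) =====
def Claim_equal_get_shortest_surname : Prop :=
  ∀ (table : List (List String)), Dom_get_shortest_surname table →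
    Pre_get_shortest_surname table →
    Spec_get_shortest_surname table (get_shortest_surname table)

-- ===== LEMMAS AND PROOFS =====

-- the first element of minimal length: a left fold replacing only on strictly smaller length
def pvFM (x : String) (t : List String) : String :=
  t.foldl (fun m y => if PySem.Str.len y < PySem.Str.len m then y else m) x

theorem pvFM_nil (x : String) : pvFM x [] = x := rfl

theorem pvFM_cons (x y : String) (t : List String) :
    pvFM x (y :: t) = pvFM (if PySem.Str.len y < PySem.Str.len x then y else x) t := by
  simp only [pvFM, List.foldl_cons]

theorem pvFM_len_le (t : List String) (x : String) :
    PySem.Str.len (pvFM x t) ≤ PySem.Str.len x := by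
  induction t generalizing x with
  | nil => simp [pvFM_nil]
  | cons y t ih =>
    rw [pvFM_cons]
    by_cases h : PySem.Str.len y < PySem.Str.len x
    · simp only [if_pos h]; exact le_trans (ih y) (le_of_lt h)
    · simp only [if_neg h]; exact ih x

theorem pvFM_eq_of_len_eq (t : List String) (x : String)
    (h : PySem.Str.len (pvFM x t) = PySem.Str.len x) : pvFM x t = x := by
  induction t generalizing x with
  | nil => simp [pvFM_nil]
  | cons y t ih =>
    rw [pvFM_cons] at h ⊢
    by_cases hy : PySem.Str.len y < PySem.Str.len x
    · rw [if_pos hy] at h ⊢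
      have := pvFM_len_le t y
      omega
    · rw [if_neg hy] at h ⊢
      exact ih x h

-- A's min-length loop computes the length of pvFM
theorem min_loop_eq_len_pvFM (t : List String) (x : String) :
    t.foldl (fun s y => if PySem.Str.len y < s then PySem.Str.len y else s) (PySem.Str.len x)
      = PySem.Str.len (pvFM x t) := by
  induction t generalizing x with
  | nil => simp [pvFM_nil]
  | cons y t ih =>
    rw [pvFM_cons, List.foldl_cons]
    by_cases h : PySem.Str.len y < PySem.Str.len x
    · rw [if_pos h, if_pos h]; exact ih y
    · rw [if_neg h, if_neg h]; exact ih x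

-- A's filter loop picks exactly the first element of minimal length
theorem filter_head_eq_pvFM (t : List String) (x : String) :
    PySem.List.pyGetD
      (List.filter (fun y => PySem.Str.len y == PySem.Str.len (pvFM x t)) (x :: t)) 0 ""
      = pvFM x t := by
  induction t generalizing x with
  | nil => simp [pvFM_nil, PySem.List.pyGetD_zero_cons]
  | cons y t ih =>
    rw [pvFM_cons]
    by_cases hy : PySem.Str.len y < PySem.Str.len x
    · rw [if_pos hy]
      have hle := pvFM_len_le t y
      have hx : (PySem.Str.len x == PySem.Str.len (pvFM y t)) = false := by
        rw [beq_eq_false_iff_ne]; omega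
      rw [List.filter_cons, hx, if_neg Bool.false_ne_true]
      exact ih y
    · rw [if_neg hy]
      by_cases hx : PySem.Str.len x = PySem.Str.len (pvFM x t)
      · have hbx : (PySem.Str.len x == PySem.Str.len (pvFM x t)) = true := by
          rw [beq_iff_eq]; exact hx
        rw [List.filter_cons, hbx, if_pos rfl, PySem.List.pyGetD_zero_cons]
        exact (pvFM_eq_of_len_eq t x hx.symm).symm
      · have hle := pvFM_len_le t x
        have hxf : (PySem.Str.len x == PySem.Str.len (pvFM x t)) = false := by
          rw [beq_eq_false_iff_ne]; exact hx
        have hyf : (PySem.Str.len y == PySem.Str.len (pvFM x t)) = false := by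
          rw [beq_eq_false_iff_ne]; omega
        have ihx := ih x
        rw [List.filter_cons, hxf, if_neg Bool.false_ne_true] at ihx
        rw [List.filter_cons, hxf, if_neg Bool.false_ne_true,
            List.filter_cons, hyf, if_neg Bool.false_ne_true]
        exact ihx

-- head of the insertion-sort fold is the first element of minimal length
theorem insert_fold_head (t : List String) (m : String) (ys : List String) :
    PySem.List.pyGetD
      (t.foldl (fun acc z =>
        PySem.List.insertBy (fun a b => decide (PySem.Str.len a < PySem.Str.len b)) z acc)
        (m :: ys)) 0 ""
      = pvFM m t := by
  induction t generalizing m ys with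
  | nil => simp [pvFM_nil, PySem.List.pyGetD_zero_cons]
  | cons y t ih =>
    rw [pvFM_cons, List.foldl_cons, PySem.List.insertBy]
    by_cases h : PySem.Str.len y < PySem.Str.len m
    · rw [if_pos (decide_eq_true_eq.mpr h), if_pos h]
      exact ih y (m :: ys)
    · rw [if_neg (by rw [decide_eq_true_eq]; exact h), if_neg h]
      exact ih m _

-- the shared surname extraction
theorem names_list_eq (table : List (List String)) :
    table.foldl (fun acc row =>
      acc ++ [PySem.List.pyGetD ((PySem.Str.split? (PySem.List.pyGetD row 1 "") " ").getD []) 1 ""]) []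
    = table.map (fun row =>
      PySem.List.pyGetD ((PySem.Str.split? (PySem.List.pyGetD row 1 "") " ").getD []) 1 "") := by
  rw [PySem.List.foldl_append_singleton_eq_map]; rfl

-- core equality on the extracted surname list
theorem core_eq (x : String) (t : List String) :
    PySem.List.pyGetD
      ((PySem.List.pyRange 0 ((x :: t).length : Int) 1).foldl
        (fun acc i => if PySem.Str.len (PySem.List.pyGetD (x :: t) i "") ==
              ((PySem.List.pyRange 0 ((x :: t).length : Int) 1).foldl
                (fun s j => if PySem.Str.len (PySem.List.pyGetD (x :: t) j "") < s
                            then PySem.Str.len (PySem.List.pyGetD (x :: t) j "") else s)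
                (PySem.Str.len (PySem.List.pyGetD (x :: t) 0 "")))
            then acc ++ [PySem.List.pyGetD (x :: t) i ""] else acc) []) 0 ""
    = PySem.List.pyGetD (PySem.List.sorted (x :: t) (fun s => PySem.Str.len s)) 0 "" := by
  rw [PySem.List.foldl_pyRange_zero_pyGetD' (x :: t) ""
        (fun s y => if PySem.Str.len y < s then PySem.Str.len y else s)]
  rw [PySem.List.pyGetD_zero_cons, List.foldl_cons, if_neg (lt_irrefl _),
      min_loop_eq_len_pvFM]
  rw [PySem.List.foldl_pyRange_zero_pyGetD' (x :: t) ""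
        (fun acc y => if PySem.Str.len y == PySem.Str.len (pvFM x t) then acc ++ [y] else acc)]
  have hfilt := PySem.List.foldl_append_if
      (fun y => PySem.Str.len y == PySem.Str.len (pvFM x t)) (fun y => y) (x :: t) []
  simp only [List.nil_append, List.map_id_fun', id] at hfilt
  rw [show (fun (acc : List String) (y : String) =>
        if PySem.Str.len y == PySem.Str.len (pvFM x t) then acc ++ [y] else acc)
      = fun acc y => if (fun y => PySem.Str.len y == PySem.Str.len (pvFM x t)) y = true
                     then acc ++ [(fun (y : String) => y) y] else acc by
    funext acc y; rfl]
  rw [hfilt, filter_head_eq_pvFM]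
  rw [PySem.List.sorted_eq_foldl_insertBy, List.foldl_cons, PySem.List.insertBy,
      insert_fold_head]

-- ===== VERDICT (by name: the statement is the Claim_ definition above) =====
theorem get_shortest_surname_spec : Claim_equal_get_shortest_surname := by
  intro table _hdom hpre
  unfold Spec_get_shortest_surname get_shortest_surname get_shortest_surname_alt
  simp only [names_list_eq]
  obtain ⟨hne, -⟩ := hpre
  rcases hxs : table.map (fun row =>
      PySem.List.pyGetD ((PySem.Str.split? (PySem.List.pyGetD row 1 "") " ").getD []) 1 "") with
    _ | ⟨x, t⟩
  · exact absurd (List.map_eq_nil_iff.mp hxs) hne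
  · exact core_eq x t
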